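-- pv_equiv track=rewrite | github.com/moneyexmachina/mxm-foundry | src/mxm/foundry/checks/predicates/makefile.py | target_commands
-- ===== SOURCE A (Python) =====
-- def target_commands(contents: str, target_name: str) -> list[str] | None:
--     lines = contents.splitlines()
--     in_target = False
--     commands: list[str] = []
--
--     for line in lines:
--         stripped = line.strip()
--
--         if not stripped:
--             continue
--
--         if not line.startswith(("\t", " ")):
--             if stripped == f"{target_name}:":
--                 in_target = True
--                 continue
--
--             if in_target:
--                 break
--
--             continue
--
--         if in_target:
--             commands.append(stripped)
--
--     if not in_target:
--         return None
--
--     return commands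
-- ===== SOURCE B (Python) =====
-- def _tail_after_header(lines, header):
--     """Lines after the first top-level line whose stripped form is the header, or None."""
--     for i, line in enumerate(lines):
--         if not line.startswith(("\t", " ")) and line.strip() == header:
--             return lines[i + 1:]
--     return None
--
--
-- def _collect(lines, header):
--     commands = []
--     for line in lines:
--         stripped = line.strip()
--         if not stripped:
--             continue
--         if line.startswith(("\t", " ")):
--             commands.append(stripped)
--         elif stripped != header:
--             break
--     return commands
--
--
-- def target_commands(contents: str, target_name: str) -> list[str] | None:
--     header = f"{target_name}:"
--     tail = _tail_after_header(contents.splitlines(), header)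
--     if tail is None:
--         return None
--     return _collect(tail, header)
-- ===== Notes on version B (the rewrite author's own statement) =====
-- stated objective: simpler
-- what changed: Replaces A's single flag-driven loop (in_target bool with break/continue and a post-loop None check) by two separate phases: one scan that locates the target header and returns the remaining lines (or None), and one collector over that suffix; no flag or post-loop check remains.
import Mathlib
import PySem

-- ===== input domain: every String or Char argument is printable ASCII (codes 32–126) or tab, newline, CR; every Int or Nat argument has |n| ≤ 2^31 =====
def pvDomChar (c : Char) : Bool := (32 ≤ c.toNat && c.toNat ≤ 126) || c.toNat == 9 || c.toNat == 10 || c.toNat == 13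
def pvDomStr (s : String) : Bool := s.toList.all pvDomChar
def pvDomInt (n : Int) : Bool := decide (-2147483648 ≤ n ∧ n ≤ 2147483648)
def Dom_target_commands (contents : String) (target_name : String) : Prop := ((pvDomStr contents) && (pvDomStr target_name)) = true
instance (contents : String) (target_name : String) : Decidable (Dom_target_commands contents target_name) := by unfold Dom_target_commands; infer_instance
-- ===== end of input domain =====

-- B replaces A's flag-driven single loop by two phases (find the header, then collect the
-- indented command lines of the suffix); objective: simpler decomposition, same O(n) cost.

-- ===== PORT A =====
-- A's for-loop with state (in_target, commands); the `break` branch returns `some cmds`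
-- because A's post-loop check `if not in_target: return None` sees in_target = True there.
def pvLoopA (header : String) : List String → Bool → List String → Option (List String)
  | [], inT, cmds => if inT then some cmds else none
  | line :: rest, inT, cmds =>
    let stripped := PySem.Str.strip line
    if stripped = "" then pvLoopA header rest inT cmds
    else if !(PySem.Str.startswith line "\t" || PySem.Str.startswith line " ") then
      if stripped = header then pvLoopA header rest true cmds
      else if inT then some cmds
      else pvLoopA header rest inT cmds
    else if inT then pvLoopA header rest inT (cmds ++ [stripped])
    else pvLoopA header rest inT cmds

def target_commands (contents : String) (target_name : String) : Option (List String) :=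
  pvLoopA (target_name ++ ":") (PySem.Str.splitlines contents) false []

-- ===== PORT B =====
-- _tail_after_header: lines after the first top-level exact header line, or none.
def pvTailAfter (header : String) : List String → Option (List String)
  | [] => none
  | line :: rest =>
    if !(PySem.Str.startswith line "\t" || PySem.Str.startswith line " ")
        && (PySem.Str.strip line == header) then some rest
    else pvTailAfter header rest

-- _collect: gather stripped indented lines, skip blanks and repeated headers, stop otherwise.
def pvCollect (header : String) : List String → List String → List String
  | [], cmds => cmds
  | line :: rest, cmds =>
    let stripped := PySem.Str.strip line
    if stripped = "" then pvCollect header rest cmds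
    else if PySem.Str.startswith line "\t" || PySem.Str.startswith line " " then
      pvCollect header rest (cmds ++ [stripped])
    else if stripped ≠ header then cmds
    else pvCollect header rest cmds

def target_commands_alt (contents : String) (target_name : String) : Option (List String) :=
  let header := target_name ++ ":"
  match pvTailAfter header (PySem.Str.splitlines contents) with
  | none => none
  | some tail => some (pvCollect header tail [])

-- ===== PRECONDITION & SPEC =====
def Spec_target_commands (contents : String) (target_name : String) (out : Option (List String)) : Prop := out = target_commands_alt contents target_name
instance (contents : String) (target_name : String) (out : Option (List String)) : Decidable (Spec_target_commands contents target_name out) := by unfold Spec_target_commands; infer_instance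

-- ===== CLAIM (what is proved, stated in full; the proofs are below) =====
def Claim_equal_target_commands : Prop := ∀ (contents : String) (target_name : String), Dom_target_commands contents target_name → Spec_target_commands contents target_name (target_commands contents target_name)

-- ===== LEMMAS AND PROOFS =====

-- Once A's flag is set, its loop is exactly B's collector.
theorem pvLoopA_true (header : String) : ∀ (lines cmds : List String),
    pvLoopA header lines true cmds = some (pvCollect header lines cmds) := by
  intro lines
  induction lines with
  | nil => intro cmds; simp [pvLoopA, pvCollect]
  | cons line rest ih =>
    intro cmds
    simp only [pvLoopA, pvCollect]
    split_ifs with h1 h2 h3 <;> simp_all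

theorem header_ne_empty (target_name : String) : target_name ++ ":" ≠ "" := by
  intro h
  have := congrArg String.length h
  simp [String.length_append] at this

-- Before the flag is set, A's loop is exactly B's search followed by the collector.
theorem pvLoopA_false (header : String) (hh : header ≠ "") : ∀ (lines : List String),
    pvLoopA header lines false [] =
      match pvTailAfter header lines with
      | none => none
      | some tail => some (pvCollect header tail []) := by
  intro lines
  induction lines with
  | nil => simp [pvLoopA, pvTailAfter]
  | cons line rest ih =>
    simp only [pvLoopA, pvTailAfter]
    by_cases hb : PySem.Str.strip line = ""
    · -- blank line: A skips it; B's search skips it too since header ≠ ""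
      simp [hb, Ne.symm hh, ih]
    · by_cases hsw : PySem.Chars.startswith line.toList ['\t'] = false ∧
          PySem.Chars.startswith line.toList [' '] = false
      · by_cases hhd : PySem.Str.strip line = header
        · simp [hsw, hhd, hh, pvLoopA_true]
        · simp [hb, hsw, hhd, ih]
      · simp [hb, hsw, ih]

-- ===== VERDICT (by name: the statement is the Claim_ definition above) =====
theorem target_commands_spec : Claim_equal_target_commands := by
  intro contents target_name _
  unfold Spec_target_commands target_commands target_commands_alt
  exact pvLoopA_false _ (header_ne_empty target_name) _
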